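-- pv_equiv track=rewrite | github.com/Anjiang-Wei/EquivalenceSet | algorithm.py | compute_access_cost
-- ===== SOURCE A (Python) =====
-- def compute_access_cost(trace_pointset_list, cur_bvh):
--     # trace_pointset_list: list of [program access]; each access is a list of PointSet, representing concurrent point tasks
--     cost_per_access = 1
--     access_cost = 0
--     for point_task_pset in trace_pointset_list:
--         for bvh_pset in cur_bvh:
--             if len(point_task_pset & bvh_pset) > 0:
--                 access_cost += cost_per_access
--     return access_cost
-- ===== SOURCE B (Python) =====
-- def compute_access_cost(trace_pointset_list, cur_bvh):
--     # Inverted index: element -> set of BVH positions whose point-set contains it.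
--     index = {}
--     for j, bvh_pset in enumerate(cur_bvh):
--         for e in bvh_pset:
--             index.setdefault(e, set()).add(j)
--     empty = set()
--     access_cost = 0
--     for point_task_pset in trace_pointset_list:
--         hit = set()
--         for e in point_task_pset:
--             hit |= index.get(e, empty)
--         access_cost += len(hit)
--     return access_cost
-- ===== Notes on version B (the rewrite author's own statement) =====
-- stated objective: faster
-- what changed: Replaces A's per-(task,BVH) pairwise intersection scan with a prebuilt inverted index from element to the set of BVH positions containing it; each task set's cost is the size of the union of its elements' posting lists, removing the inner scan over all BVH sets.
import Mathlib
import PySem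

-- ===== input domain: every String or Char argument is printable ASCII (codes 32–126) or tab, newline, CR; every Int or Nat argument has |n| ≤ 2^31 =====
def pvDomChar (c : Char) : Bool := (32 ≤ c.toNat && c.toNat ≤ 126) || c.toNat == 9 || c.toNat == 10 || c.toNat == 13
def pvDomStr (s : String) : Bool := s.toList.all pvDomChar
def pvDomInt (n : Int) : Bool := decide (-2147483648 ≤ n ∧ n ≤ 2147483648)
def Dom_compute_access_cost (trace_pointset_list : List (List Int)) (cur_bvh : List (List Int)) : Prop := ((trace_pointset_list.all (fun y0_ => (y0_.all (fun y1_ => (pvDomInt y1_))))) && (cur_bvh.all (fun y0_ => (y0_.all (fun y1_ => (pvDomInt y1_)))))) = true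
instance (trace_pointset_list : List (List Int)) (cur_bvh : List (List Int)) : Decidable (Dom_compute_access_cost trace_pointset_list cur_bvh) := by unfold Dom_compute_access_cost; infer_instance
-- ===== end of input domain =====

-- B replaces A's pairwise intersection scan by an inverted index (element -> set of BVH positions) and counts, per task set, the union of the posting lists (alternative decomposition; return value only).

-- ===== PORT A =====
def compute_access_cost (trace_pointset_list : List (List Int)) (cur_bvh : List (List Int)) : Int :=
  -- cost_per_access = 1; access_cost = 0; nested for-loops
  trace_pointset_list.foldl (fun access_cost point_task_pset =>
    cur_bvh.foldl (fun access_cost bvh_pset =>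
      if 0 < PySem.Set.len (PySem.Set.inter point_task_pset bvh_pset) then access_cost + 1
      else access_cost) access_cost) 0

-- ===== PORT B =====
-- index.setdefault(e, set()).add(j)  ==  index[e] = index.get(e, set()) ∪ {j}
def pvIndexOne (j : Int) (d : PySem.Dict Int (PySem.Set Int)) (bvh_pset : List Int) : PySem.Dict Int (PySem.Set Int) :=
  bvh_pset.foldl (fun d e => d.modify e PySem.Set.empty (fun s => PySem.Set.add s j)) d

-- for j, bvh_pset in enumerate(cur_bvh): …
def pvBuildIndex (cur_bvh : List (List Int)) : PySem.Dict Int (PySem.Set Int) :=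
  (PySem.List.enumerate cur_bvh).foldl (fun d p => pvIndexOne p.1 d p.2) PySem.Dict.empty

-- hit = set(); for e in point_task_pset: hit |= index.get(e, set())
def pvHit (index : PySem.Dict Int (PySem.Set Int)) (point_task_pset : List Int) : PySem.Set Int :=
  point_task_pset.foldl (fun hit e => PySem.Set.union hit (index.getD e PySem.Set.empty)) PySem.Set.empty

def compute_access_cost_alt (trace_pointset_list : List (List Int)) (cur_bvh : List (List Int)) : Int :=
  let index := pvBuildIndex cur_bvh
  trace_pointset_list.foldl (fun access_cost point_task_pset =>
    access_cost + PySem.Set.len (pvHit index point_task_pset)) 0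

-- ===== PRECONDITION & SPEC =====
def Spec_compute_access_cost (trace_pointset_list : List (List Int)) (cur_bvh : List (List Int)) (out : Int) : Prop := out = compute_access_cost_alt trace_pointset_list cur_bvh
instance (trace_pointset_list : List (List Int)) (cur_bvh : List (List Int)) (out : Int) : Decidable (Spec_compute_access_cost trace_pointset_list cur_bvh out) := by unfold Spec_compute_access_cost; infer_instance

-- ===== CLAIM (what is proved, stated in full; the proofs are below) =====
def Claim_equal_compute_access_cost : Prop := ∀ (trace_pointset_list : List (List Int)) (cur_bvh : List (List Int)), Dom_compute_access_cost trace_pointset_list cur_bvh → Spec_compute_access_cost trace_pointset_list cur_bvh (compute_access_cost trace_pointset_list cur_bvh)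

-- ===== LEMMAS AND PROOFS =====

-- A's inner-loop test: the intersection is nonempty iff some task element lies in the BVH set.
theorem pv_predA_iff (a b : List Int) :
    (0 < PySem.Set.len (PySem.Set.inter a b)) ↔ ∃ e ∈ a, e ∈ b := by
  have h : ∀ y, y ∈ PySem.Set.inter a b ↔ y ∈ a ∧ y ∈ b := PySem.Set.mem_inter a b
  simp only [PySem.Set.len]
  rw [Int.natCast_pos, List.length_pos_iff_exists_mem]
  constructor
  · rintro ⟨y, hy⟩; exact ⟨y, ((h y).mp hy).1, ((h y).mp hy).2⟩
  · rintro ⟨e, he, heb⟩; exact ⟨e, (h e).mpr ⟨he, heb⟩⟩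

-- counting loop = countP
theorem pv_foldl_count (a : List Int) (l : List (List Int)) (acc : Int) :
    l.foldl (fun access_cost b =>
      if 0 < PySem.Set.len (PySem.Set.inter a b) then access_cost + 1 else access_cost) acc
    = acc + (l.countP (fun b => decide (∃ e ∈ a, e ∈ b)) : Int) := by
  induction l generalizing acc with
  | nil => simp
  | cons b t ih =>
    simp only [List.foldl_cons, List.countP_cons, ih]
    by_cases hb : ∃ e ∈ a, e ∈ b
    · rw [if_pos ((pv_predA_iff a b).mpr hb)]; simp [hb]; ring
    · rw [if_neg (fun hp => hb ((pv_predA_iff a b).mp hp))]; simp [hb]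

-- membership in the posting list produced by one BVH set
theorem pv_mem_indexOne (b : List Int) (j : Int) (d : PySem.Dict Int (PySem.Set Int)) (e j' : Int) :
    j' ∈ (pvIndexOne j d b).getD e PySem.Set.empty ↔
      j' ∈ d.getD e PySem.Set.empty ∨ (j' = j ∧ e ∈ b) := by
  induction b generalizing d with
  | nil => simp [pvIndexOne]
  | cons x t ih =>
    simp only [pvIndexOne, List.foldl_cons] at *
    rw [ih, PySem.Dict.getD_modify]
    by_cases hex : e = x
    · subst hex
      rw [if_pos rfl, PySem.Set.mem_add]
      simp only [List.mem_cons]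
      tauto
    · rw [if_neg hex]
      simp only [List.mem_cons]
      tauto

-- membership in the full inverted index (folded over any prefix state)
theorem pv_mem_indexAux (l : List (Int × List Int)) (d : PySem.Dict Int (PySem.Set Int)) (e j' : Int) :
    j' ∈ (l.foldl (fun d p => pvIndexOne p.1 d p.2) d).getD e PySem.Set.empty ↔
      j' ∈ d.getD e PySem.Set.empty ∨ ∃ p ∈ l, p.1 = j' ∧ e ∈ p.2 := by
  induction l generalizing d with
  | nil => simp
  | cons p t ih =>
    simp only [List.foldl_cons, ih, pv_mem_indexOne, List.mem_cons]
    constructor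
    · rintro (((h | ⟨rfl, he⟩) | h))
      · exact Or.inl h
      · exact Or.inr ⟨p, Or.inl rfl, rfl, he⟩
      · rcases h with ⟨q, hq, hh⟩; exact Or.inr ⟨q, Or.inr hq, hh⟩
    · rintro (h | ⟨q, (rfl | hq), h1, h2⟩)
      · exact Or.inl (Or.inl h)
      · exact Or.inl (Or.inr ⟨h1.symm, h2⟩)
      · exact Or.inr ⟨q, hq, h1, h2⟩

theorem pv_mem_index (cur_bvh : List (List Int)) (e j' : Int) :
    j' ∈ (pvBuildIndex cur_bvh).getD e PySem.Set.empty ↔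
      ∃ p ∈ PySem.List.enumerate cur_bvh 0, p.1 = j' ∧ e ∈ p.2 := by
  unfold pvBuildIndex
  rw [pv_mem_indexAux]
  simp [PySem.Dict.getD_empty, PySem.Set.empty]

-- the hit set: membership and nodup, by folding unions
theorem pv_mem_foldl_union (l : List Int) (idx : PySem.Dict Int (PySem.Set Int))
    (h0 : PySem.Set Int) (j : Int) :
    j ∈ l.foldl (fun hit e => PySem.Set.union hit (idx.getD e PySem.Set.empty)) h0 ↔
      j ∈ h0 ∨ ∃ e ∈ l, j ∈ idx.getD e PySem.Set.empty := by
  induction l generalizing h0 with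
  | nil => simp
  | cons x t ih =>
    simp only [List.foldl_cons, ih, PySem.Set.mem_union, List.mem_cons]
    constructor
    · rintro ((h | h) | ⟨e, he, hj⟩)
      · exact Or.inl h
      · exact Or.inr ⟨x, Or.inl rfl, h⟩
      · exact Or.inr ⟨e, Or.inr he, hj⟩
    · rintro (h | ⟨e, (rfl | he), hj⟩)
      · exact Or.inl (Or.inl h)
      · exact Or.inl (Or.inr hj)
      · exact Or.inr ⟨e, he, hj⟩

theorem pv_nodup_foldl_union (l : List Int) (idx : PySem.Dict Int (PySem.Set Int))
    (h0 : PySem.Set Int) (hn : List.Nodup h0) :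
    List.Nodup (l.foldl (fun hit e => PySem.Set.union hit (idx.getD e PySem.Set.empty)) h0) := by
  induction l generalizing h0 with
  | nil => exact hn
  | cons x t ih => exact ih _ (PySem.Set.nodup_union _ _ hn)

-- per task set: |hit| = number of BVH positions whose set meets the task set
theorem pv_len_hit (a : List Int) (cur_bvh : List (List Int)) :
    PySem.Set.len (pvHit (pvBuildIndex cur_bvh) a)
      = (cur_bvh.countP (fun b => decide (∃ e ∈ a, e ∈ b)) : Int) := by
  set E := PySem.List.enumerate cur_bvh 0 with hE
  set L := (E.filter (fun p => decide (∃ e ∈ a, e ∈ p.2))).map (fun p => p.1) with hL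
  have hmem : ∀ j, j ∈ pvHit (pvBuildIndex cur_bvh) a ↔ j ∈ L := by
    intro j
    unfold pvHit
    rw [pv_mem_foldl_union]
    rw [or_iff_right (show j ∉ PySem.Set.empty by simp [PySem.Set.empty])]
    constructor
    · rintro ⟨e, he, hj⟩
      rw [pv_mem_index] at hj
      rcases hj with ⟨p, hp, rfl, hep⟩
      rw [hL]
      simp only [List.mem_map, List.mem_filter]
      exact ⟨p, ⟨hp, by simp; exact ⟨e, he, hep⟩⟩, rfl⟩
    · intro hj
      rw [hL] at hj
      simp only [List.mem_map, List.mem_filter] at hj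
      rcases hj with ⟨p, ⟨hp, hq⟩, rfl⟩
      simp only [decide_eq_true_eq] at hq
      rcases hq with ⟨e, he, hep⟩
      exact ⟨e, he, (pv_mem_index cur_bvh e p.1).mpr ⟨p, hp, rfl, hep⟩⟩
  have hndh : List.Nodup (pvHit (pvBuildIndex cur_bvh) a) :=
    pv_nodup_foldl_union a _ _ List.nodup_nil
  have hndL : List.Nodup L := by
    have h1 : E.Pairwise (fun p q => p.1 < q.1) := PySem.List.pairwise_lt_enumerate cur_bvh 0
    have h2 : (E.filter (fun p => decide (∃ e ∈ a, e ∈ p.2))).Pairwise (fun p q => p.1 < q.1) :=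
      h1.filter _
    rw [hL, List.nodup_iff_pairwise_ne, List.pairwise_map]
    exact h2.imp (fun h => ne_of_lt h)
  have hperm : (pvHit (pvBuildIndex cur_bvh) a).Perm L :=
    (List.perm_ext_iff_of_nodup hndh hndL).mpr hmem
  have hlen : (pvHit (pvBuildIndex cur_bvh) a).length = L.length := hperm.length_eq
  have hLlen : L.length = cur_bvh.countP (fun b => decide (∃ e ∈ a, e ∈ b)) := by
    rw [hL, List.length_map, ← List.countP_eq_length_filter]
    conv_rhs => rw [← PySem.List.map_snd_enumerate cur_bvh 0]
    rw [List.countP_map]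
    rfl
  simp only [PySem.Set.len, hlen, hLlen]

theorem pv_main (trace_pointset_list cur_bvh : List (List Int)) (acc : Int) :
    trace_pointset_list.foldl (fun access_cost point_task_pset =>
      cur_bvh.foldl (fun access_cost bvh_pset =>
        if 0 < PySem.Set.len (PySem.Set.inter point_task_pset bvh_pset) then access_cost + 1
        else access_cost) access_cost) acc
    = trace_pointset_list.foldl (fun access_cost point_task_pset =>
        access_cost + PySem.Set.len (pvHit (pvBuildIndex cur_bvh) point_task_pset)) acc := by
  induction trace_pointset_list generalizing acc with
  | nil => rfl
  | cons a t ih =>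
    simp only [List.foldl_cons]
    rw [pv_foldl_count, pv_len_hit, ih]

-- ===== VERDICT (by name: the statement is the Claim_ definition above) =====
theorem compute_access_cost_spec : Claim_equal_compute_access_cost := by
  intro trace_pointset_list cur_bvh _
  show compute_access_cost trace_pointset_list cur_bvh = compute_access_cost_alt trace_pointset_list cur_bvh
  unfold compute_access_cost compute_access_cost_alt
  exact pv_main trace_pointset_list cur_bvh 0
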